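-- pv_equiv track=rewrite | github.com/Earendil58/Python_Algoritmos | tps/TP2/TP_2_AGUIRRE_03.py | controlar_direcciones
-- ===== SOURCE A (Python) =====
-- def controlar_direcciones(dir, tipo_control, cod_pos, tipo, forma):
--     control = tipo_control
--     digitos = "0123456789"
--     letras_con_acento_minusculas = "áéíóúñü"
--     letras_con_acento_mayusculas = "ÁÉÍÓÚÑÜ"
--     letras_sin_acento_minusculas = "abcdefghijklmnopqrstuvwxyz"
--     letras_sin_acento_mayusculas = "ABCDEFGHIJKLMNOPQRSTUVWXYZ"
--     caracteres = digitos + letras_con_acento_minusculas + letras_con_acento_mayusculas + letras_sin_acento_minusculas + letras_sin_acento_mayusculas + " ."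
--     mayusculas = letras_con_acento_mayusculas + letras_sin_acento_mayusculas
--
--     tiene_dos_mayusculas_seguidas = False
--     boolEsDigito = False
--     contador = 0
--     anterior = " "
--
--     for car in dir:
--         if car in caracteres:
--             contador += 1
--             if car in digitos:
--                 boolEsDigito = True
--             elif car in mayusculas and anterior in mayusculas:
--                 tiene_dos_mayusculas_seguidas = True
--             anterior = car
--
--     if control == "Hard Control":
--         if len(dir) == contador and not tiene_dos_mayusculas_seguidas and boolEsDigito:
--             return 1, 0, cod_pos, tipo, forma
--         else:
--             return 0, 1, cod_pos, tipo, forma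
--     elif control == "Soft Control":
--         return 1, 0, cod_pos, tipo, forma
--
--     return 0, 1, (), (), ()
-- ===== SOURCE B (Python) =====
-- def controlar_direcciones(dir, tipo_control, cod_pos, tipo, forma):
--     digitos = "0123456789"
--     mayusculas = "ÁÉÍÓÚÑÜ" + "ABCDEFGHIJKLMNOPQRSTUVWXYZ"
--     caracteres = (digitos + "áéíóúñü" + "ÁÉÍÓÚÑÜ"
--                   + "abcdefghijklmnopqrstuvwxyz"
--                   + "ABCDEFGHIJKLMNOPQRSTUVWXYZ" + " .")
--
--     filtrados = [c for c in dir if c in caracteres]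
--     contador = len(filtrados)
--     boolEsDigito = any(c in digitos for c in filtrados)
--     tiene_dos_mayusculas_seguidas = any(
--         a in mayusculas and b in mayusculas
--         for a, b in zip(filtrados, filtrados[1:]))
--
--     if tipo_control == "Hard Control":
--         if len(dir) == contador and not tiene_dos_mayusculas_seguidas and boolEsDigito:
--             return 1, 0, cod_pos, tipo, forma
--         return 0, 1, cod_pos, tipo, forma
--     if tipo_control == "Soft Control":
--         return 1, 0, cod_pos, tipo, forma
--     return 0, 1, (), (), ()
-- ===== Notes on version B (the rewrite author's own statement) =====
-- stated objective: simpler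
-- what changed: Replaces A's single fused loop carrying four pieces of state (counter, digit flag, adjacent-uppercase flag, previous accepted char) with a build-then-scan decomposition: filter the allowed characters once, then derive the count, the digit flag and the adjacent-uppercase flag by separate passes (len / any / zip-with-tail) over the filtered list.
import Mathlib
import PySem

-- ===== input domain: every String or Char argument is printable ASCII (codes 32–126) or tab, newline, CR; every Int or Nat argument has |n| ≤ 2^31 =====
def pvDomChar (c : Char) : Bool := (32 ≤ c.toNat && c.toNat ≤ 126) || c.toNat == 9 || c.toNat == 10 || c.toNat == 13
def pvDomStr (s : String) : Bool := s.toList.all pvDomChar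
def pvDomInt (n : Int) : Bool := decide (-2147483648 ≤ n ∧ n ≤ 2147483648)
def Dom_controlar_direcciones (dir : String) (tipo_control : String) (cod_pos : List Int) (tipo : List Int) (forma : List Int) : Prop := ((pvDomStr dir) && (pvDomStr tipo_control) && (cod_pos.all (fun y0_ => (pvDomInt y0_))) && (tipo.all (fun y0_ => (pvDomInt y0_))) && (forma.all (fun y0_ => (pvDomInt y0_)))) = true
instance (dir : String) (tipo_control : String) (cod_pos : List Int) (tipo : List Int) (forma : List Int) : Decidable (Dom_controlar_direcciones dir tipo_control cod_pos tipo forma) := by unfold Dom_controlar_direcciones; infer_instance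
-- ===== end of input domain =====

-- B replaces A's single fused accumulator loop (count + digit flag + adjacent-uppercase flag
-- + previous-char state) by a build-then-scan decomposition: filter once, then length / any /
-- zip-with-tail passes over the filtered list; objective: simpler.


-- ===== PORT A =====
def digitosA : List Char := "0123456789".toList
def mayusculasA : List Char := ("ÁÉÍÓÚÑÜ" ++ "ABCDEFGHIJKLMNOPQRSTUVWXYZ").toList
def caracteresA : List Char :=
  ("0123456789" ++ "áéíóúñü" ++ "ÁÉÍÓÚÑÜ" ++ "abcdefghijklmnopqrstuvwxyz"
    ++ "ABCDEFGHIJKLMNOPQRSTUVWXYZ" ++ " .").toList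

-- the fused loop body: state = (tiene_dos_mayusculas_seguidas, boolEsDigito, contador, anterior)
def aStep (s : Bool × Bool × Int × Char) (car : Char) : Bool × Bool × Int × Char :=
  if car ∈ caracteresA then
    if car ∈ digitosA then (s.1, true, s.2.2.1 + 1, car)
    else if car ∈ mayusculasA ∧ s.2.2.2 ∈ mayusculasA then (true, s.2.1, s.2.2.1 + 1, car)
    else (s.1, s.2.1, s.2.2.1 + 1, car)
  else s

def controlar_direcciones (dir : String) (tipo_control : String) (cod_pos : List Int) (tipo : List Int) (forma : List Int) : Int × Int × List Int × List Int × List Int :=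
  let st := dir.toList.foldl aStep (false, false, 0, ' ')
  if tipo_control = "Hard Control" then
    if PySem.Str.len dir = st.2.2.1 ∧ st.1 = false ∧ st.2.1 = true then
      (1, 0, cod_pos, tipo, forma)
    else (0, 1, cod_pos, tipo, forma)
  else if tipo_control = "Soft Control" then (1, 0, cod_pos, tipo, forma)
  else (0, 1, [], [], [])

-- ===== PORT B =====
def digitosB : List Char := "0123456789".toList
def mayusculasB : List Char := ("ÁÉÍÓÚÑÜ" ++ "ABCDEFGHIJKLMNOPQRSTUVWXYZ").toList
def caracteresB : List Char :=
  ("0123456789" ++ "áéíóúñü" ++ "ÁÉÍÓÚÑÜ" ++ "abcdefghijklmnopqrstuvwxyz"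
    ++ "ABCDEFGHIJKLMNOPQRSTUVWXYZ" ++ " .").toList

def controlar_direcciones_alt (dir : String) (tipo_control : String) (cod_pos : List Int) (tipo : List Int) (forma : List Int) : Int × Int × List Int × List Int × List Int :=
  let filtrados := dir.toList.filter (fun c => c ∈ caracteresB)
  let contador : Int := filtrados.length
  let boolEsDigito := filtrados.any (fun c => c ∈ digitosB)
  let dosMayusculas := (filtrados.zip filtrados.tail).any
    (fun p => p.1 ∈ mayusculasB && p.2 ∈ mayusculasB)
  if tipo_control = "Hard Control" then
    if PySem.Str.len dir = contador ∧ dosMayusculas = false ∧ boolEsDigito = true then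
      (1, 0, cod_pos, tipo, forma)
    else (0, 1, cod_pos, tipo, forma)
  else if tipo_control = "Soft Control" then (1, 0, cod_pos, tipo, forma)
  else (0, 1, [], [], [])

-- ===== PRECONDITION & SPEC =====
def Spec_controlar_direcciones (dir : String) (tipo_control : String) (cod_pos : List Int) (tipo : List Int) (forma : List Int) (out : Int × Int × List Int × List Int × List Int) : Prop := out = controlar_direcciones_alt dir tipo_control cod_pos tipo forma
instance (dir : String) (tipo_control : String) (cod_pos : List Int) (tipo : List Int) (forma : List Int) (out : Int × Int × List Int × List Int × List Int) : Decidable (Spec_controlar_direcciones dir tipo_control cod_pos tipo forma out) := by unfold Spec_controlar_direcciones; infer_instance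

-- ===== CLAIM (what is proved, stated in full; the proofs are below) =====
def Claim_equal_controlar_direcciones : Prop := ∀ (dir : String) (tipo_control : String) (cod_pos : List Int) (tipo : List Int) (forma : List Int), Dom_controlar_direcciones dir tipo_control cod_pos tipo forma → Spec_controlar_direcciones dir tipo_control cod_pos tipo forma (controlar_direcciones dir tipo_control cod_pos tipo forma)

-- ===== LEMMAS AND PROOFS =====

lemma digit_not_may {c : Char} (h1 : c ∈ digitosA) (h2 : c ∈ mayusculasA) : False := by
  have ha : digitosA.all (fun d => decide (d ∉ mayusculasA)) = true := by decide
  have h := List.all_eq_true.mp ha c h1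
  simp only [decide_eq_true_eq] at h
  exact h h2

-- the loop invariant: the fused fold computed from the filtered suffix
lemma aLoop_inv (l : List Char) (dos dig : Bool) (cnt : Int) (ant : Char) :
    l.foldl aStep (dos, dig, cnt, ant) =
      (dos || ((ant :: l.filter (fun c => c ∈ caracteresA)).zip
                 (l.filter (fun c => c ∈ caracteresA))).any
              (fun p => p.1 ∈ mayusculasA && p.2 ∈ mayusculasA),
       dig || (l.filter (fun c => c ∈ caracteresA)).any (fun c => c ∈ digitosA),
       cnt + (l.filter (fun c => c ∈ caracteresA)).length,
       (l.filter (fun c => c ∈ caracteresA)).getLastD ant) := by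
  induction l generalizing dos dig cnt ant with
  | nil => simp only [List.foldl_nil, List.filter_nil, List.zip_nil_right, List.any_nil,
      Bool.or_false, List.length_nil, Nat.cast_zero, add_zero, List.getLastD_nil]
  | cons c t ih =>
    by_cases hc : c ∈ caracteresA
    · have hfilt : List.filter (fun c => decide (c ∈ caracteresA)) (c :: t)
          = c :: List.filter (fun c => decide (c ∈ caracteresA)) t :=
        List.filter_cons_of_pos (by simp [hc])
      by_cases hd : c ∈ digitosA
      · have hm : ¬ c ∈ mayusculasA := fun h => digit_not_may hd h
        simp only [List.foldl_cons, aStep, if_pos hc, if_pos hd, ih, hfilt,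
          List.zip_cons_cons, List.any_cons, List.getLastD_cons, Prod.mk.injEq]
        refine ⟨?_, ?_, ?_, trivial⟩
        · simp [hm]
        · simp [hd]
        · simp only [List.length_cons, Nat.cast_add, Nat.cast_one]; ring
      · by_cases hmm : c ∈ mayusculasA ∧ ant ∈ mayusculasA
        · simp only [List.foldl_cons, aStep, if_pos hc, if_neg hd, if_pos hmm, ih, hfilt,
            List.zip_cons_cons, List.any_cons, List.getLastD_cons, Prod.mk.injEq]
          refine ⟨?_, ?_, ?_, trivial⟩
          · simp [hmm.1, hmm.2]
          · simp [hd]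
          · simp only [List.length_cons, Nat.cast_add, Nat.cast_one]; ring
        · simp only [List.foldl_cons, aStep, if_pos hc, if_neg hd, if_neg hmm, ih, hfilt,
            List.zip_cons_cons, List.any_cons, List.getLastD_cons, Prod.mk.injEq]
          refine ⟨?_, ?_, ?_, trivial⟩
          · have : (decide (ant ∈ mayusculasA) && decide (c ∈ mayusculasA)) = false := by
              rcases Decidable.em (c ∈ mayusculasA) with h | h
              · have : ¬ ant ∈ mayusculasA := fun ha => hmm ⟨h, ha⟩
                simp [this]
              · simp [h]
            simp [this]
          · simp [hd]
          · simp only [List.length_cons, Nat.cast_add, Nat.cast_one]; ring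
    · have hfilt : List.filter (fun c => decide (c ∈ caracteresA)) (c :: t)
          = List.filter (fun c => decide (c ∈ caracteresA)) t :=
        List.filter_cons_of_neg (by simp [hc])
      simp only [List.foldl_cons, aStep, if_neg hc, ih, hfilt]

lemma space_not_may : ¬ (' ' ∈ mayusculasA) := by decide

lemma head_pair_drop (F : List Char) :
    ((' ' :: F).zip F).any (fun p => p.1 ∈ mayusculasA && p.2 ∈ mayusculasA)
      = (F.zip F.tail).any (fun p => p.1 ∈ mayusculasA && p.2 ∈ mayusculasA) := by
  cases F with
  | nil => rfl
  | cons a t =>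
    simp only [List.tail_cons, List.zip_cons_cons, List.any_cons]
    simp [space_not_may]

-- ===== VERDICT (by name: the statement is the Claim_ definition above) =====
theorem controlar_direcciones_spec : Claim_equal_controlar_direcciones := by
  intro dir tipo_control cod_pos tipo forma _
  unfold Spec_controlar_direcciones controlar_direcciones controlar_direcciones_alt
  have h1 : caracteresB = caracteresA := rfl
  have h2 : digitosB = digitosA := rfl
  have h3 : mayusculasB = mayusculasA := rfl
  rw [h1, h2, h3, aLoop_inv]
  simp only [Bool.false_or, zero_add]
  rw [head_pair_drop]
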